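-- pv_equiv track=rewrite | github.com/RedHatInsights/bonfire | bonfire/elastic_logging.py | _mask_parameter_values
-- ===== SOURCE A (Python) =====
-- def _mask_parameter_values(cli_args):
--     masked_list = []
--
--     is_parameter = False
--     for arg in cli_args:
--         if is_parameter:
--             masked_arg = f"{arg.split('=')[0]}=*******"
--             masked_list.append(masked_arg)
--             is_parameter = False
--         else:
--             masked_list.append(arg)
--             is_parameter = arg == "-p" or arg == "--set-parameter"
--
--     return masked_list
-- ===== SOURCE B (Python) =====
-- def _mask_parameter_values(cli_args):
--     masked_list = []
--     i = 0
--     n = len(cli_args)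
--     while i < n:
--         arg = cli_args[i]
--         masked_list.append(arg)
--         if arg == "-p" or arg == "--set-parameter":
--             if i + 1 < n:
--                 masked_list.append(f"{cli_args[i + 1].split('=')[0]}=*******")
--                 i += 2
--             else:
--                 i += 1
--         else:
--             i += 1
--     return masked_list
-- ===== Notes on version B (the rewrite author's own statement) =====
-- stated objective: alternative
-- what changed: Replaced the for-loop carrying an is_parameter boolean across iterations with an index-driven while loop that consumes a flag and its following value as an explicit pair (advancing by 2), so no state crosses iterations.
import Mathlib
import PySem

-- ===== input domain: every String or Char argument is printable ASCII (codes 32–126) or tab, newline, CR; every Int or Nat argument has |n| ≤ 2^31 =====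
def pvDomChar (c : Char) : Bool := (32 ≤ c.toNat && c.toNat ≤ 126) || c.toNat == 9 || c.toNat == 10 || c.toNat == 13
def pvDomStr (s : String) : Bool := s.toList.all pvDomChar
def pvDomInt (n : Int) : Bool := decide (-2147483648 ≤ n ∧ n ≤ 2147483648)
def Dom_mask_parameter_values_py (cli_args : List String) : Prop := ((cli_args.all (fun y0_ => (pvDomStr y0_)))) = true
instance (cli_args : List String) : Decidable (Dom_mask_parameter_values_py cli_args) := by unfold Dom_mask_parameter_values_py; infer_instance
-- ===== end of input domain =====

-- B replaces A's for-loop with a cross-iteration boolean by an index-driven while loop that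
-- consumes a flag and its following value as an explicit pair (objective: alternative, same cost).

-- f"{s.split('=')[0]}=*******"  (shared masking expression of both sources)
def pvMask (s : String) : String := (((PySem.Str.split? s "=").getD []).headD "") ++ "=*******"

-- ===== PORT A =====
-- for-loop of A: recursion over the remaining args carrying is_parameter
def pvLoopA : List String → Bool → List String
  | [], _ => []
  | arg :: rest, is_parameter =>
      if is_parameter then
        pvMask arg :: pvLoopA rest false
      else
        arg :: pvLoopA rest (arg == "-p" || arg == "--set-parameter")

def mask_parameter_values_py (cli_args : List String) : List String :=
  pvLoopA cli_args false

-- ===== PORT B =====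
-- while-loop of B: recursion on the index i into cli_args
def pvLoopB (cli_args : List String) (i : Nat) : List String :=
  if h : i < cli_args.length then
    let arg := cli_args[i]
    if arg == "-p" || arg == "--set-parameter" then
      if h2 : i + 1 < cli_args.length then
        arg :: pvMask cli_args[i + 1] :: pvLoopB cli_args (i + 2)
      else
        arg :: pvLoopB cli_args (i + 1)
    else
      arg :: pvLoopB cli_args (i + 1)
  else []
termination_by cli_args.length - i

def mask_parameter_values_py_alt (cli_args : List String) : List String :=
  pvLoopB cli_args 0

-- ===== PRECONDITION & SPEC =====
def Spec_mask_parameter_values_py (cli_args : List String) (out : List String) : Prop := out = mask_parameter_values_py_alt cli_args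
instance (cli_args : List String) (out : List String) : Decidable (Spec_mask_parameter_values_py cli_args out) := by unfold Spec_mask_parameter_values_py; infer_instance

-- ===== CLAIM (what is proved, stated in full; the proofs are below) =====
def Claim_equal_mask_parameter_values_py : Prop := ∀ (cli_args : List String), Dom_mask_parameter_values_py cli_args → Spec_mask_parameter_values_py cli_args (mask_parameter_values_py cli_args)

-- ===== LEMMAS AND PROOFS =====

lemma pvLoopB_eq_loopA_drop (cli_args : List String) (i : Nat) :
    pvLoopB cli_args i = pvLoopA (cli_args.drop i) false := by
  have main : ∀ (k i : Nat), cli_args.length - i ≤ k →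
      pvLoopB cli_args i = pvLoopA (cli_args.drop i) false := by
    intro k
    induction k with
    | zero =>
        intro i hk
        rw [pvLoopB]
        have h : ¬ i < cli_args.length := by omega
        have hdrop : cli_args.drop i = [] := List.drop_eq_nil_of_le (by omega)
        simp [h, hdrop, pvLoopA]
    | succ k ih =>
        intro i hk
        rw [pvLoopB]
        by_cases h : i < cli_args.length
        · rw [List.drop_eq_getElem_cons h]
          by_cases hflag : (cli_args[i] == "-p" || cli_args[i] == "--set-parameter") = true
          · by_cases h2 : i + 1 < cli_args.length
            · rw [List.drop_eq_getElem_cons h2]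
              simp only [dif_pos h, dif_pos h2, hflag, if_pos]
              rw [ih (i + 2) (by omega)]
              simp [pvLoopA, hflag]
            · have hdrop : cli_args.drop (i + 1) = [] := List.drop_eq_nil_of_le (by omega)
              simp only [dif_pos h, dif_neg h2, hflag, if_pos]
              rw [ih (i + 1) (by omega), hdrop]
              simp [pvLoopA]
          · simp only [dif_pos h, if_neg hflag]
            rw [ih (i + 1) (by omega)]
            simp only [Bool.not_eq_true] at hflag
            simp [pvLoopA, hflag]
        · have hdrop : cli_args.drop i = [] := List.drop_eq_nil_of_le (by omega)
          simp [h, hdrop, pvLoopA]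
  exact main (cli_args.length - i) i (le_refl _)

-- ===== VERDICT (by name: the statement is the Claim_ definition above) =====
theorem mask_parameter_values_py_spec : Claim_equal_mask_parameter_values_py := by
  intro cli_args _
  unfold Spec_mask_parameter_values_py mask_parameter_values_py mask_parameter_values_py_alt
  rw [pvLoopB_eq_loopA_drop]
  simp
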